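-- pv_equiv track=rewrite | github.com/Iris-Shi1/DC2_Group23 | Dataset_preparation/Merge.py | generate_folder_names
-- ===== SOURCE A (Python) =====
-- from typing import List
--
-- def generate_folder_names(start_year: int, start_month: int, end_year: int, end_month: int) -> List[str]:
--     """
--     Generate folder names from start_year-start_month to end_year-end_month.
--     :param start_year: The starting year.
--     :param start_month: The starting month.
--     :param end_year: The ending year.
--     :param end_month: The ending month.
--     :return: A list of folder names.
--     """
--     folder_names = []
--     current_year = start_year
--     current_month = start_month
--
--     while current_year < end_year or (current_year == end_year and current_month <= end_month):
--         folder_name = f"{current_year}-{current_month:02d}"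
--         folder_path = f'data\{folder_name}'
--         folder_names.append(folder_path)
--         current_month += 1
--         if current_month > 12:
--             current_year += 1
--             current_month = 1
--
--     return folder_names
-- ===== SOURCE B (Python) =====
-- from typing import List
--
-- def generate_folder_names(start_year: int, start_month: int, end_year: int, end_month: int) -> List[str]:
--     start_idx = start_year * 12 + (start_month - 1)
--     end_idx = end_year * 12 + (end_month - 1)
--     folder_names = []
--     for idx in range(start_idx, end_idx + 1):
--         folder_names.append(f"data\\{idx // 12}-{idx % 12 + 1:02d}")
--     return folder_names
-- ===== Notes on version B (the rewrite author's own statement) =====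
-- stated objective: simpler
-- what changed: Replaces the while-loop with an incremental month/year carry counter by a single for-loop over closed-form absolute month indices (year*12+month-1), deriving year and month back by //12 and %12.
-- outside the precondition, e.g. on generate_folder_names(2020, 13, 2020, 13): A returns ['data\\2020-13'], B returns ['data\\2021-01']; on generate_folder_names(2020, 0, 2020, 0): A returns ['data\\2020-00'], B returns ['data\\2019-12']
import Mathlib
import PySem

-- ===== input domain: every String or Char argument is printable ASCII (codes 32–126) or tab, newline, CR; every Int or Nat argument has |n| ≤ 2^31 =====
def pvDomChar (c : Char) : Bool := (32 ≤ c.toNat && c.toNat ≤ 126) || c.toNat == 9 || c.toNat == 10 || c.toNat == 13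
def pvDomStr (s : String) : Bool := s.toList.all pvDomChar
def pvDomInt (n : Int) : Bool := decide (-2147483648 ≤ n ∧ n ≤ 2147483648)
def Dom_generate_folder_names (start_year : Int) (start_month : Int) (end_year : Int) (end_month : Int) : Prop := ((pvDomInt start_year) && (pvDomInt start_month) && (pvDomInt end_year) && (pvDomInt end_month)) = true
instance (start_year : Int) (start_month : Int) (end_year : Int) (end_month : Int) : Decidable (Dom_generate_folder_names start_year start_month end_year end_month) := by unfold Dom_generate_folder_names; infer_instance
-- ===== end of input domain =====

-- B replaces A's carry-counter while-loop by a for-loop over closed-form absolute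
-- month indices (simpler decomposition; same cost).


-- ===== PORT A =====
-- f"{m:02d}" ; exact for 0 ≤ m (the only months the loop formats under Pre_)
def pvFmt02A (m : Int) : String :=
  if 0 ≤ m ∧ m < 10 then "0" ++ PySem.Int.toStr m else PySem.Int.toStr m

-- the while-loop of A, fueled; under Pre_ the fuel passed below is exactly the
-- number of iterations, so the guard 'fuel = 0' is never the reason it stops
def pvLoopA : Nat → Int → Int → Int → Int → List String
  | 0, _, _, _, _ => []
  | fuel + 1, y, m, ey, em =>
    if y < ey ∨ (y = ey ∧ m ≤ em) then
      ("data\\" ++ (PySem.Int.toStr y ++ "-" ++ pvFmt02A m)) ::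
        (if m + 1 > 12 then pvLoopA fuel (y + 1) 1 ey em
         else pvLoopA fuel y (m + 1) ey em)
    else []

def generate_folder_names (start_year : Int) (start_month : Int) (end_year : Int) (end_month : Int) : List String :=
  pvLoopA ((13 - start_month).toNat + 1 + ((end_year - start_year).toNat + 1) * 12)
    start_year start_month end_year end_month

-- ===== PORT B =====
def pvFmt02B (m : Int) : String :=
  if 0 ≤ m ∧ m < 10 then "0" ++ PySem.Int.toStr m else PySem.Int.toStr m

def generate_folder_names_alt (start_year : Int) (start_month : Int) (end_year : Int) (end_month : Int) : List String :=
  (PySem.List.pyRange (start_year * 12 + (start_month - 1)) (end_year * 12 + (end_month - 1) + 1) 1).map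
    (fun idx => "data\\" ++ PySem.Int.toStr (PySem.Int.floordiv idx 12) ++ "-" ++ pvFmt02B (PySem.Int.mod idx 12 + 1))

-- ===== PRECONDITION & SPEC =====
-- Pre_ admits the function's natural domain — months in the calendar range 1..12 —
-- plus every input on which A's loop never runs and B's index range is also empty;
-- it excludes out-of-range months on which A still returns, because there A's values
-- (e.g. a "data\2020-13" or "data\2020-00" folder) are accidents of the carry loop
-- that B's index arithmetic does not reproduce.
def Pre_generate_folder_names (start_year : Int) (start_month : Int) (end_year : Int) (end_month : Int) : Prop :=
  (1 ≤ start_month ∧ start_month ≤ 12 ∧ 1 ≤ end_month ∧ end_month ≤ 12) ∨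
  ((end_year < start_year ∨ (end_year = start_year ∧ end_month < start_month)) ∧
    end_year * 12 + end_month < start_year * 12 + start_month)

instance (start_year : Int) (start_month : Int) (end_year : Int) (end_month : Int) : Decidable (Pre_generate_folder_names start_year start_month end_year end_month) := by unfold Pre_generate_folder_names; infer_instance

def pvWitness_generate_folder_names : Int × Int × Int × Int := (2019, 11, 2020, 2)

def Spec_generate_folder_names (start_year : Int) (start_month : Int) (end_year : Int) (end_month : Int) (out : List String) : Prop := out = generate_folder_names_alt start_year start_month end_year end_month
instance (start_year : Int) (start_month : Int) (end_year : Int) (end_month : Int) (out : List String) : Decidable (Spec_generate_folder_names start_year start_month end_year end_month out) := by unfold Spec_generate_folder_names; infer_instance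

-- ===== CLAIM (what is proved, stated in full; the proofs are below) =====
def Claim_equal_generate_folder_names : Prop := ∀ (start_year : Int) (start_month : Int) (end_year : Int) (end_month : Int), Dom_generate_folder_names start_year start_month end_year end_month → Pre_generate_folder_names start_year start_month end_year end_month → Spec_generate_folder_names start_year start_month end_year end_month (generate_folder_names start_year start_month end_year end_month)

-- ===== LEMMAS AND PROOFS =====

lemma pvFmt_eq (m : Int) : pvFmt02A m = pvFmt02B m := rfl

lemma pv_floordiv_idx (y m : Int) (h1 : 1 ≤ m) (h2 : m ≤ 12) :
    PySem.Int.floordiv (y * 12 + (m - 1)) 12 = y := by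
  rw [PySem.Int.floordiv_eq_iff_of_pos (by omega)]
  omega

lemma pv_mod_idx (y m : Int) (h1 : 1 ≤ m) (h2 : m ≤ 12) :
    PySem.Int.mod (y * 12 + (m - 1)) 12 = m - 1 := by
  have h := PySem.Int.floordiv_mul_add_mod (y * 12 + (m - 1)) 12
  rw [pv_floordiv_idx y m h1 h2] at h
  omega

lemma pvLoopA_eq (ey em : Int) (hem1 : 1 ≤ em) (hem2 : em ≤ 12) :
    ∀ (fuel : Nat) (y m : Int), 1 ≤ m → m ≤ 12 →
      ((ey * 12 + em) - (y * 12 + m) + 1).toNat ≤ fuel →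
      pvLoopA fuel y m ey em =
        (PySem.List.pyRange (y * 12 + (m - 1)) (ey * 12 + (em - 1) + 1) 1).map
          (fun idx => "data\\" ++ PySem.Int.toStr (PySem.Int.floordiv idx 12) ++ "-" ++ pvFmt02B (PySem.Int.mod idx 12 + 1)) := by
  intro fuel
  induction fuel with
  | zero =>
    intro y m hm1 hm2 hfuel
    have hle : ey * 12 + (em - 1) + 1 ≤ y * 12 + (m - 1) := by omega
    rw [PySem.List.pyRange_one_eq_nil hle]
    rfl
  | succ fuel ih =>
    intro y m hm1 hm2 hfuel
    by_cases hlt : y * 12 + m ≤ ey * 12 + em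
    case neg =>
      have hcond : ¬ (y < ey ∨ (y = ey ∧ m ≤ em)) := by omega
      have hle : ey * 12 + (em - 1) + 1 ≤ y * 12 + (m - 1) := by omega
      rw [PySem.List.pyRange_one_eq_nil hle]
      simp only [pvLoopA, if_neg hcond, List.map_nil]
    have hcond : y < ey ∨ (y = ey ∧ m ≤ em) := by omega
    have hrange : y * 12 + (m - 1) < ey * 12 + (em - 1) + 1 := by omega
    rw [PySem.List.pyRange_one_cons hrange, List.map_cons]
    simp only [pvLoopA, if_pos hcond]
    rw [pv_floordiv_idx y m hm1 hm2, pv_mod_idx y m hm1 hm2]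
    have harg : m - 1 + 1 = m := by omega
    rw [harg, ← pvFmt_eq]
    by_cases hc : m + 1 > 12
    · rw [if_pos hc]
      have hm12 : m = 12 := by omega
      have h1 : (y + 1) * 12 + (1 - 1) = y * 12 + (m - 1) + 1 := by omega
      have := ih (y + 1) 1 (by omega) (by omega) (by omega)
      rw [h1] at this
      rw [this]
      simp [String.append_assoc]
    · rw [if_neg hc]
      have h1 : y * 12 + (m + 1 - 1) = y * 12 + (m - 1) + 1 := by omega
      have := ih y (m + 1) (by omega) (by omega) (by omega)
      rw [h1] at this
      rw [this]
      simp [String.append_assoc]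

lemma pvLoopA_nil (fuel : Nat) (y m ey em : Int)
    (h : ¬ (y < ey ∨ (y = ey ∧ m ≤ em))) : pvLoopA fuel y m ey em = [] := by
  cases fuel with
  | zero => rfl
  | succ fuel => simp only [pvLoopA, if_neg h]

-- ===== VERDICT (by name: the statement is the Claim_ definition above) =====
theorem generate_folder_names_spec : Claim_equal_generate_folder_names := by
  intro sy sm ey em _hdom hpre
  unfold Spec_generate_folder_names generate_folder_names generate_folder_names_alt
  rcases hpre with ⟨h1, h2, h3, h4⟩ | ⟨hcond, hidx⟩
  · exact pvLoopA_eq ey em h3 h4 _ sy sm h1 h2 (by omega)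
  · rw [pvLoopA_nil _ _ _ _ _ (by omega),
      PySem.List.pyRange_one_eq_nil (by omega), List.map_nil]
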